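-- pv_equiv track=rewrite | github.com/sharma0611/dsworkflows | common/featureanalysis.py | fill_mask
-- ===== SOURCE A (Python) =====
-- def fill_mask(mask, vals, default):
--     if mask:
--         good_vals = sum(x == 0 for x in mask)
--     else:
--         return vals
--     assert good_vals == len(vals) #ensure
--     final = []
--     i = 0
--     for x in mask:
--         if x == 0:
--             y = vals[i]
--             i = i + 1
--         else:
--             y = default
--         final.append(y)
--     return final
-- ===== SOURCE B (Python) =====
-- def fill_mask(mask, vals, default):
--     if not mask:
--         return vals
--     idx = [i for i, x in enumerate(mask) if x == 0]
--     assert len(idx) == len(vals)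
--     final = [default] * len(mask)
--     for j, i in enumerate(idx):
--         final[i] = vals[j]
--     return final
-- ===== Notes on version B (the rewrite author's own statement) =====
-- stated objective: alternative
-- what changed: Replaces the interleaved append loop carrying a running value-index with a pre-fill of [default]*len(mask) followed by a scatter of vals into the precomputed list of zero positions.
import Mathlib
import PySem

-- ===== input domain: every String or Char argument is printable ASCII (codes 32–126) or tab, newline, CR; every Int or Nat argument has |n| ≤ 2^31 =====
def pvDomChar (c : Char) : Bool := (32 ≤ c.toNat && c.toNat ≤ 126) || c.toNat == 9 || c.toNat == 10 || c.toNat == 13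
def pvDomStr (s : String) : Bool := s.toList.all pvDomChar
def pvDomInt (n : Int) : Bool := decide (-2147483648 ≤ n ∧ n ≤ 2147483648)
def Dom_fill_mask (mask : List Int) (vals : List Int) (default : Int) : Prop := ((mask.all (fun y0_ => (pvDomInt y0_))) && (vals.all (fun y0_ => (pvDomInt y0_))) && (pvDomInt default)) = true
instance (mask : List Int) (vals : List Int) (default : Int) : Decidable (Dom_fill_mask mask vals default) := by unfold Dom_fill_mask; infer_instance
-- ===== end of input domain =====

-- B pre-fills [default]*len(mask) and scatters vals into the zero positions instead of A's
-- interleaved append loop; objective: alternative decomposition, same cost.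

-- ===== PORT A =====
-- the running index i is always ≥ 0, so it is kept as a Nat; vals[i] as vals.getD i 0
-- (on every input admitted by Pre_fill_mask the index is in range, matching Python exactly)
def fill_mask (mask : List Int) (vals : List Int) (default : Int) : List Int :=
  if mask = [] then vals
  else
    (mask.foldl (fun (s : List Int × Nat) x =>
        if x = 0 then (s.1 ++ [vals.getD s.2 0], s.2 + 1)
        else (s.1 ++ [default], s.2)) ([], 0)).1

-- ===== PORT B =====
def fill_mask_alt (mask : List Int) (vals : List Int) (default : Int) : List Int :=
  if mask = [] then vals
  else
    let idx := (mask.zipIdx.filter (fun p => p.1 = 0)).map (·.2)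
    let final := List.replicate mask.length default
    (idx.foldl (fun (s : List Int × Nat) i => (s.1.set i (vals.getD s.2 0), s.2 + 1)) (final, 0)).1

-- ===== PRECONDITION & SPEC =====
-- Pre_ excludes exactly the inputs where the Python assert fails (count of zeros ≠ len(vals)
-- with a non-empty mask), on which both A and B raise AssertionError.
def Pre_fill_mask (mask : List Int) (vals : List Int) (default : Int) : Prop :=
  mask = [] ∨ mask.countP (fun x => decide (x = 0)) = vals.length
instance (mask : List Int) (vals : List Int) (default : Int) : Decidable (Pre_fill_mask mask vals default) := by unfold Pre_fill_mask; infer_instance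
def pvWitness_fill_mask : List Int × List Int × Int := ([0, 1, 0], [5, 7], 2)

def Spec_fill_mask (mask : List Int) (vals : List Int) (default : Int) (out : List Int) : Prop := out = fill_mask_alt mask vals default
instance (mask : List Int) (vals : List Int) (default : Int) (out : List Int) : Decidable (Spec_fill_mask mask vals default out) := by unfold Spec_fill_mask; infer_instance

-- ===== CLAIM (what is proved, stated in full; the proofs are below) =====
def Claim_equal_fill_mask : Prop := ∀ (mask : List Int) (vals : List Int) (default : Int), Dom_fill_mask mask vals default → Pre_fill_mask mask vals default → Spec_fill_mask mask vals default (fill_mask mask vals default)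

-- ===== LEMMAS AND PROOFS =====

/-- Reference function: the value both ports compute on a non-empty mask
(`j` is the absolute index into `vals` of the next zero slot). -/
def pvGo (vals : List Int) (default : Int) : List Int → Nat → List Int
  | [], _ => []
  | x :: ms, j =>
    if x = 0 then vals.getD j 0 :: pvGo vals default ms (j + 1)
    else default :: pvGo vals default ms j

theorem pvA_fold (vals : List Int) (default : Int) :
    ∀ (mask : List Int) (acc : List Int) (j : Nat),
      (mask.foldl (fun (s : List Int × Nat) x =>
          if x = 0 then (s.1 ++ [vals.getD s.2 0], s.2 + 1)
          else (s.1 ++ [default], s.2)) (acc, j)).1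
        = acc ++ pvGo vals default mask j := by
  intro mask
  induction mask with
  | nil => intro acc j; simp [pvGo]
  | cons x ms ih =>
    intro acc j
    by_cases hx : x = 0
    · simp only [List.foldl_cons, if_pos hx, ih, pvGo, hx, if_true]
      simp
    · simp only [List.foldl_cons, if_neg hx, ih, pvGo, hx, if_false]
      simp

theorem pv_set_mid (pre : List Int) (y v : Int) (t : List Int) :
    (pre ++ y :: t).set pre.length v = pre ++ v :: t := by
  induction pre with
  | nil => simp
  | cons a l ih => simp [ih]

theorem pvB_fold (vals : List Int) (default : Int) :
    ∀ (mask : List Int) (pre : List Int) (j : Nat),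
      ((((mask.zipIdx pre.length).filter (fun p => p.1 = 0)).map (·.2)).foldl
          (fun (s : List Int × Nat) i => (s.1.set i (vals.getD s.2 0), s.2 + 1))
          (pre ++ List.replicate mask.length default, j)).1
        = pre ++ pvGo vals default mask j := by
  intro mask
  induction mask with
  | nil => intro pre j; simp [pvGo]
  | cons x ms ih =>
    intro pre j
    by_cases hx : x = 0
    · simp only [List.zipIdx_cons, List.filter_cons, hx, decide_true, if_true, List.map_cons,
        List.length_cons, List.replicate_succ, List.foldl_cons]
      rw [pv_set_mid]
      have := ih (pre ++ [vals.getD j 0]) (j + 1)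
      simp only [List.length_append, List.length_cons, List.length_nil, Nat.zero_add,
        List.append_assoc, List.singleton_append] at this ⊢
      rw [this]
      simp [pvGo, hx]
    · have hd : (decide (x = 0)) = false := by simp [hx]
      simp only [List.zipIdx_cons, List.filter_cons, hd, Bool.false_eq_true, if_false,
        List.length_cons, List.replicate_succ]
      have := ih (pre ++ [default]) j
      simp only [List.length_append, List.length_cons, List.length_nil, Nat.zero_add,
        List.append_assoc, List.singleton_append] at this ⊢
      rw [this]
      simp [pvGo, hx]

-- ===== VERDICT (by name: the statement is the Claim_ definition above) =====
theorem fill_mask_spec : Claim_equal_fill_mask := by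
  intro mask vals default _ _
  unfold Spec_fill_mask fill_mask fill_mask_alt
  by_cases hm : mask = []
  · simp [hm]
  · simp only [hm, if_false]
    rw [pvA_fold]
    have := pvB_fold vals default mask [] 0
    simpa using this.symm
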